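-- pv_equiv track=rewrite | github.com/jbharvey1/poe-mcp-server | poe_filter.py | _find_block_bounds
-- ===== SOURCE A (Python) =====
-- def _find_block_bounds(lines: list[str], start: int) -> tuple[int, int]:
--     """Return (start, end) line indices (inclusive) for block starting at `start`."""
--     end = start
--     for i in range(start + 1, len(lines)):
--         stripped = lines[i].strip()
--         if stripped.startswith(("Show", "Hide", "Continue")):
--             # Next block starts here — previous line is our end
--             end = i - 1
--             break
--     else:
--         end = len(lines) - 1
--     # Trim trailing blank lines from block
--     while end > start and not lines[end].strip():
--         end -= 1
--     return start, end
-- ===== SOURCE B (Python) =====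
-- def _find_block_bounds(lines: list[str], start: int) -> tuple[int, int]:
--     """Return (start, end) line indices (inclusive) for block starting at `start`."""
--     end = min(start, len(lines) - 1)
--     for i in range(start + 1, len(lines)):
--         stripped = lines[i].strip()
--         if stripped.startswith(("Show", "Hide", "Continue")):
--             break
--         if stripped:
--             end = i
--     return start, end
-- ===== Notes on version B (the rewrite author's own statement) =====
-- stated objective: simpler
-- what changed: Single forward pass that tracks the last non-blank line index (initial end clamped to the last line), replacing A's for/else header scan followed by a separate backward while-loop trimming trailing blanks.
import Mathlib
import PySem

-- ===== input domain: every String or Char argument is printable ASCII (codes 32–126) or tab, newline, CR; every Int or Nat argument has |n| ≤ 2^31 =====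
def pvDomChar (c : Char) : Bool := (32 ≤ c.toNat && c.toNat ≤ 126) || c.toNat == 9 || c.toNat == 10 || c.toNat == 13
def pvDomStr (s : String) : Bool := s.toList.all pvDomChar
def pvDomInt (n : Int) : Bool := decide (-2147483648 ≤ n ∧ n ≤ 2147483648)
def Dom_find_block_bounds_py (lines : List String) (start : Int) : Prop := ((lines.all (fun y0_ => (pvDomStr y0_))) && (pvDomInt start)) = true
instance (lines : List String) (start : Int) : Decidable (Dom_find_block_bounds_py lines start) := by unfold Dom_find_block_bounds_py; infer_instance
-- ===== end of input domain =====

-- B folds A's separate backward trailing-blank trim into the single forward scan by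
-- tracking the last non-blank index, with the initial end clamped to the last line
-- (objective: simpler, same cost).

-- ===== PORT A =====
-- lines[i].strip() (index may be negative; out-of-range = IndexError, excluded by Pre_)
def pvStripAt (lines : List String) (i : Int) : String :=
  PySem.Str.strip (PySem.List.pyGetD lines i "")

-- stripped.startswith(("Show", "Hide", "Continue"))
def pvIsHeader (s : String) : Bool :=
  PySem.Str.startswith s "Show" || PySem.Str.startswith s "Hide" || PySem.Str.startswith s "Continue"

-- while end > start and not lines[end].strip(): end -= 1
def pvA_trim (lines : List String) (start e : Int) : Int :=
  if h : start < e ∧ (pvStripAt lines e == "") = true then pvA_trim lines start (e - 1) else e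
termination_by (e - start).toNat
decreasing_by omega

-- the for/else loop: break at the first header (end = i - 1), else end = len(lines) - 1,
-- then the trailing-blank trim
def pvA_scan (lines : List String) (start : Int) : List Int → Int
  | [] => pvA_trim lines start ((lines.length : Int) - 1)
  | i :: rest =>
    if pvIsHeader (pvStripAt lines i) then pvA_trim lines start (i - 1)
    else pvA_scan lines start rest

def find_block_bounds_py (lines : List String) (start : Int) : Int × Int :=
  (start, pvA_scan lines start (PySem.List.pyRange (start + 1) (lines.length : Int) 1))

-- ===== PORT B =====
-- single forward pass: break on a header, otherwise remember the last non-blank index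
def pvB_loop (lines : List String) (e : Int) : List Int → Int
  | [] => e
  | i :: rest =>
    let stripped := pvStripAt lines i
    if pvIsHeader stripped then e
    else if (stripped == "") = true then pvB_loop lines e rest
    else pvB_loop lines i rest

def find_block_bounds_py_alt (lines : List String) (start : Int) : Int × Int :=
  (start, pvB_loop lines (min start ((lines.length : Int) - 1)) (PySem.List.pyRange (start + 1) (lines.length : Int) 1))

-- ===== PRECONDITION & SPEC =====
-- Pre_ excludes exactly the inputs where A raises IndexError: start ≤ -len(lines)-2,
-- where the loop's first negative index start+1 is below -len(lines).
def Pre_find_block_bounds_py (lines : List String) (start : Int) : Prop :=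
  -(lines.length : Int) - 1 ≤ start
instance (lines : List String) (start : Int) : Decidable (Pre_find_block_bounds_py lines start) := by unfold Pre_find_block_bounds_py; infer_instance

def pvWitness_find_block_bounds_py : List String × Int := (["Show x", "a", "", "Hide y"], 0)

def Spec_find_block_bounds_py (lines : List String) (start : Int) (out : Int × Int) : Prop :=
  out = find_block_bounds_py_alt lines start
instance (lines : List String) (start : Int) (out : Int × Int) : Decidable (Spec_find_block_bounds_py lines start out) := by unfold Spec_find_block_bounds_py; infer_instance

-- ===== CLAIM (what is proved, stated in full; the proofs are below) =====
def Claim_equal_find_block_bounds_py : Prop := ∀ (lines : List String) (start : Int), Dom_find_block_bounds_py lines start → Pre_find_block_bounds_py lines start → Spec_find_block_bounds_py lines start (find_block_bounds_py lines start)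

-- ===== LEMMAS AND PROOFS =====

-- Trimming from c-1 down lands exactly on e when everything strictly between e and c is blank
-- and e itself is a keeper (= start, or non-blank).
lemma pv_trim_eq (lines : List String) (start e : Int)
    (he : start ≤ e) (hkeep : e = start ∨ (pvStripAt lines e == "") = false) :
    ∀ (n : Nat) (c : Int), c - 1 - e = (n : Int) → e < c →
      (∀ j : Int, e < j → j < c → (pvStripAt lines j == "") = true) →
      pvA_trim lines start (c - 1) = e := by
  intro n
  induction n with
  | zero =>
    intro c h0 hlt _
    have hce : c - 1 = e := by omega
    rw [hce, pvA_trim, dif_neg]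
    rcases hkeep with h | h
    · omega
    · simp [h]
  | succ k ih =>
    intro c h0 hlt hblank
    have hc1 : e < c - 1 := by omega
    rw [pvA_trim, dif_pos ⟨by omega, hblank (c - 1) hc1 (by omega)⟩]
    have := ih (c - 1) (by omega) hc1 (fun j hj1 hj2 => hblank j hj1 (by omega))
    simpa using this

-- Main invariant: scanning the remaining index range [c, len) with A (then trimming)
-- equals B's fold when e is the last keeper so far.
lemma pv_main (lines : List String) (start : Int) :
    ∀ (n : Nat) (c e : Int), (lines.length : Int) - c = (n : Int) →
      start ≤ e → e < c →
      (e = start ∨ (pvStripAt lines e == "") = false) →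
      (∀ j : Int, e < j → j < c → (pvStripAt lines j == "") = true) →
      pvA_scan lines start (PySem.List.pyRange c (lines.length : Int) 1) =
        pvB_loop lines e (PySem.List.pyRange c (lines.length : Int) 1) := by
  intro n
  induction n with
  | zero =>
    intro c e h0 hse hec hkeep hblank
    rw [PySem.List.pyRange_one_eq_nil (by omega)]
    show pvA_trim lines start ((lines.length : Int) - 1) = e
    have hcl : c = (lines.length : Int) := by omega
    rw [← hcl]
    exact pv_trim_eq lines start e hse hkeep (c - 1 - e).toNat c (by omega) hec hblank
  | succ k ih =>
    intro c e h0 hse hec hkeep hblank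
    have hc : c < (lines.length : Int) := by omega
    rw [PySem.List.pyRange_one_cons (by omega)]
    simp only [pvA_scan, pvB_loop]
    by_cases hH : pvIsHeader (pvStripAt lines c) = true
    · simp only [hH, if_true]
      exact pv_trim_eq lines start e hse hkeep (c - 1 - e).toNat c (by omega) hec hblank
    · simp only [hH, if_false, Bool.false_eq_true]
      by_cases hB : (pvStripAt lines c == "") = true
      · simp only [hB, if_true]
        exact ih (c + 1) e (by omega) hse (by omega) hkeep
          (fun j hj1 hj2 => by
            by_cases hjc : j = c
            · exact hjc ▸ hB
            · exact hblank j hj1 (by omega))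
      · simp only [hB, if_false, Bool.false_eq_true]
        exact ih (c + 1) c (by omega) (by omega) (by omega)
          (Or.inr (by simpa using hB))
          (fun j hj1 hj2 => by omega)

-- ===== VERDICT (by name: the statement is the Claim_ definition above) =====
theorem find_block_bounds_py_spec : Claim_equal_find_block_bounds_py := by
  intro lines start _dom _pre
  unfold Spec_find_block_bounds_py find_block_bounds_py find_block_bounds_py_alt
  by_cases hlt : start < (lines.length : Int)
  · have hmin : min start ((lines.length : Int) - 1) = start := by omega
    rw [hmin]
    rw [pv_main lines start ((lines.length : Int) - (start + 1)).toNat (start + 1) start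
      (by omega) (le_refl start) (by omega) (Or.inl rfl) (fun j hj1 hj2 => by omega)]
  · have hmin : min start ((lines.length : Int) - 1) = (lines.length : Int) - 1 := by omega
    rw [hmin, PySem.List.pyRange_one_eq_nil (by omega)]
    show (start, pvA_trim lines start ((lines.length : Int) - 1)) =
      (start, pvB_loop lines ((lines.length : Int) - 1) [])
    rw [pvA_trim, dif_neg (by omega)]
    rfl
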